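-- pv_equiv track=rewrite | github.com/Archegon/elixir_backend | core/session_service.py | _get_parameter_category
-- ===== SOURCE A (Python) =====
-- def _get_parameter_category(param_name: str) -> str:
--     """Determine parameter category from name"""
--     name_lower = param_name.lower()
--     if "pressure" in name_lower:
--         return "pressure"
--     elif "temperature" in name_lower or "temp" in name_lower:
--         return "temperature"
--     elif "oxygen" in name_lower or "o2" in name_lower:
--         return "oxygen"
--     elif "mode" in name_lower:
--         return "mode"
--     elif any(word in name_lower for word in ["ac", "light", "intercom"]):
--         return "control"
--     else:
--         return "general"
-- ===== SOURCE B (Python) =====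
-- _CATEGORIES = ["pressure", "temperature", "oxygen", "mode", "control", "general"]
-- _KEYWORD_RANKS = [
--     ("pressure", 0),
--     ("temperature", 1), ("temp", 1),
--     ("oxygen", 2), ("o2", 2),
--     ("mode", 3),
--     ("ac", 4), ("light", 4), ("intercom", 4),
-- ]
--
--
-- def _best_rank(name: str) -> int:
--     """Smallest keyword rank matched anywhere in `name` (5 if none):
--     one sweep over the positions, prefix-testing each keyword there."""
--     best = 5
--     for i in range(len(name)):
--         for kw, rank in _KEYWORD_RANKS:
--             if name.startswith(kw, i):
--                 best = min(best, rank)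
--     return best
--
--
-- def _get_parameter_category(param_name: str) -> str:
--     return _CATEGORIES[_best_rank(param_name.lower())]
-- ===== Notes on version B (the rewrite author's own statement) =====
-- stated objective: alternative
-- what changed: Instead of an if/elif chain of substring membership tests, B sweeps the lowered string once by recursion over its suffixes, taking the minimum rank of any keyword that is a prefix of the current suffix, and indexes a category table with that minimum rank.
import Mathlib
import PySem

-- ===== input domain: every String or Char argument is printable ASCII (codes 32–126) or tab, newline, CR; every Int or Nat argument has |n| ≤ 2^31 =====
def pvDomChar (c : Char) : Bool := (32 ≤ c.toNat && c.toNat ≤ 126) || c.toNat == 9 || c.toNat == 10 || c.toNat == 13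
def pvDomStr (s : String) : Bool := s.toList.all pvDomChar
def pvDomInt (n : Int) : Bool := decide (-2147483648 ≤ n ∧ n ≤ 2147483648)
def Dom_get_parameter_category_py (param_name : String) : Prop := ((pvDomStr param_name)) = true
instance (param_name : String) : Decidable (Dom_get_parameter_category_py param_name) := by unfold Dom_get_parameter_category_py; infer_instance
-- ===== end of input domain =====

-- B replaces A's if/elif substring-membership chain by one index sweep over the lowered
-- string, taking the minimum rank of any keyword that starts at the current position,
-- then indexing a category table with that minimum; objective: alternative.

-- ===== PORT A =====
def get_parameter_category_py (param_name : String) : String :=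
  let name_lower := PySem.Str.lower param_name
  if PySem.Str.isIn "pressure" name_lower then "pressure"
  else if PySem.Str.isIn "temperature" name_lower || PySem.Str.isIn "temp" name_lower then "temperature"
  else if PySem.Str.isIn "oxygen" name_lower || PySem.Str.isIn "o2" name_lower then "oxygen"
  else if PySem.Str.isIn "mode" name_lower then "mode"
  else if ["ac", "light", "intercom"].any (fun word => PySem.Str.isIn word name_lower) then "control"
  else "general"

-- ===== PORT B =====
def pvCategories : List String :=
  ["pressure", "temperature", "oxygen", "mode", "control", "general"]

def pvKeywordRanks : List (List Char × Nat) :=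
  [("pressure".toList, 0),
   ("temperature".toList, 1), ("temp".toList, 1),
   ("oxygen".toList, 2), ("o2".toList, 2),
   ("mode".toList, 3),
   ("ac".toList, 4), ("light".toList, 4), ("intercom".toList, 4)]

-- Source B's `_best_rank`: for i in range(len(name)): for kw, rank in _KEYWORD_RANKS: …
-- `name.startswith(kw, i)` is ported as a prefix test on `name.drop i.toNat`,
-- exact here since every i produced by range(len(name)) satisfies 0 ≤ i ≤ len(name)
def pvBestRank (name : List Char) : Nat :=
  (PySem.List.pyRange 0 (name.length : Int) 1).foldl
    (fun best i =>
      pvKeywordRanks.foldl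
        (fun b p => if PySem.Chars.startswith (name.drop i.toNat) p.1 then min b p.2 else b)
        best)
    5

-- `_CATEGORIES[best]`: best is always < 6, so plain list indexing is exact here
def get_parameter_category_py_alt (param_name : String) : String :=
  pvCategories.getD (pvBestRank (PySem.Chars.lower param_name.toList)) "general"

-- ===== PRECONDITION & SPEC =====
def Spec_get_parameter_category_py (param_name : String) (out : String) : Prop := out = get_parameter_category_py_alt param_name
instance (param_name : String) (out : String) : Decidable (Spec_get_parameter_category_py param_name out) := by unfold Spec_get_parameter_category_py; infer_instance

-- ===== CLAIM (what is proved, stated in full; the proofs are below) =====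
def Claim_equal_get_parameter_category_py : Prop := ∀ (param_name : String), Dom_get_parameter_category_py param_name → Spec_get_parameter_category_py param_name (get_parameter_category_py param_name)

-- ===== LEMMAS AND PROOFS =====

-- first-true-wins chain over (flag, rank) pairs, default 5
def pvChain : List (Bool × Nat) → Nat
  | [] => 5
  | (b, r) :: rest => if b then r else pvChain rest

-- A's chain, at rank level: first keyword (in rank order) occurring anywhere in `name`
def pvRankOf (name : List Char) : Nat :=
  pvChain (pvKeywordRanks.map (fun p => (PySem.Chars.isIn p.1 name, p.2)))

-- the chain at the head position only, for B's sweep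
def pvHere (s : List Char) : Nat :=
  pvChain (pvKeywordRanks.map (fun p => (PySem.Chars.startswith s p.1, p.2)))

-- spec of B's sweep: min over all suffixes of the head-position chain
def pvSweep : List Char → Nat
  | [] => 5
  | c :: cs => min (pvHere (c :: cs)) (pvSweep cs)

-- B's inner loop over the keyword table
def pvInner (s : List Char) (b : Nat) : Nat :=
  pvKeywordRanks.foldl
    (fun m p => if PySem.Chars.startswith (s) p.1 then min m p.2 else m) b

lemma pvChain_ge (l : List (Bool × Nat)) (r : Nat) (h5 : r ≤ 5)
    (h : ∀ p ∈ l, r ≤ p.2) : r ≤ pvChain l := by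
  induction l with
  | nil => simpa [pvChain]
  | cons p rest ih =>
    obtain ⟨b, k⟩ := p
    cases b with
    | false =>
      rw [show pvChain ((false, k) :: rest) = pvChain rest by simp [pvChain]]
      exact ih (fun q hq => h q (by simp [hq]))
    | true =>
      rw [show pvChain ((true, k) :: rest) = k by simp [pvChain]]
      exact h (true, k) (by simp)

lemma pvChain_le5 (l : List (Bool × Nat)) (h5 : ∀ p ∈ l, p.2 ≤ 5) :
    pvChain l ≤ 5 := by
  induction l with
  | nil => simp [pvChain]
  | cons p rest ih =>
    obtain ⟨b, k⟩ := p
    cases b with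
    | false =>
      rw [show pvChain ((false, k) :: rest) = pvChain rest by simp [pvChain]]
      exact ih (fun q hq => h5 q (by simp [hq]))
    | true =>
      rw [show pvChain ((true, k) :: rest) = k by simp [pvChain]]
      exact h5 (true, k) (by simp)

-- a fold of conditional mins over a rank-sorted table = min of the start value and the chain
lemma pvFoldl_min (l : List (Bool × Nat))
    (hs : List.Pairwise (fun p q => p.2 ≤ q.2) l) (h5 : ∀ p ∈ l, p.2 ≤ 5)
    (best : Nat) (hb : best ≤ 5) :
    l.foldl (fun m p => if p.1 then min m p.2 else m) best = min best (pvChain l) := by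
  induction l generalizing best with
  | nil => simp [pvChain, Nat.min_eq_left hb]
  | cons p rest ih =>
    obtain ⟨b, k⟩ := p
    have hk5 : k ≤ 5 := h5 (b, k) (by simp)
    have hrest5 : ∀ q ∈ rest, q.2 ≤ 5 := fun q hq => h5 q (by simp [hq])
    cases b with
    | false =>
      rw [List.foldl_cons, if_neg (by simp),
        show pvChain ((false, k) :: rest) = pvChain rest by simp [pvChain]]
      exact ih hs.of_cons hrest5 best hb
    | true =>
      rw [List.foldl_cons, if_pos rfl,
        show pvChain ((true, k) :: rest) = k by simp [pvChain]]
      rw [ih hs.of_cons hrest5 (min best k) (le_trans (Nat.min_le_left _ _) hb)]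
      have : k ≤ pvChain rest :=
        pvChain_ge rest k hk5 (fun q hq => (List.pairwise_cons.mp hs).1 q hq)
      omega

lemma pvChain_or (l : List (Bool × Bool × Nat))
    (hs : List.Pairwise (fun p q => p.2.2 ≤ q.2.2) l) (h5 : ∀ p ∈ l, p.2.2 ≤ 5) :
    pvChain (l.map fun p => (p.1 || p.2.1, p.2.2)) =
      min (pvChain (l.map fun p => (p.1, p.2.2)))
          (pvChain (l.map fun p => (p.2.1, p.2.2))) := by
  induction l with
  | nil => simp [pvChain]
  | cons p rest ih =>
    obtain ⟨b1, b2, r⟩ := p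
    have hr5 : r ≤ 5 := h5 (b1, b2, r) (by simp)
    have hrest : ∀ q ∈ rest, r ≤ q.2.2 := fun q hq => (List.pairwise_cons.mp hs).1 q hq
    have h5' : ∀ q ∈ rest, q.2.2 ≤ 5 := fun q hq => h5 q (by simp [hq])
    cases b1 <;> cases b2 <;> simp [pvChain]
    · exact ih hs.of_cons h5'
    · have : r ≤ pvChain (rest.map fun p => (p.1, p.2.2)) := by
        apply pvChain_ge _ _ hr5; intro q hq
        obtain ⟨q', hq', rfl⟩ := List.mem_map.mp hq
        exact hrest q' hq'
      omega
    · have : r ≤ pvChain (rest.map fun p => (p.2.1, p.2.2)) := by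
        apply pvChain_ge _ _ hr5; intro q hq
        obtain ⟨q', hq', rfl⟩ := List.mem_map.mp hq
        exact hrest q' hq'
      omega

lemma pvIsIn_cons (kw : List Char) (c : Char) (cs : List Char) :
    PySem.Chars.isIn kw (c :: cs) =
      (PySem.Chars.startswith (c :: cs) kw || PySem.Chars.isIn kw cs) := by
  rw [Bool.eq_iff_iff]
  simp [PySem.Chars.isIn_iff_infix, PySem.Chars.startswith_iff, List.infix_cons_iff]

lemma pvRanks_sorted : List.Pairwise (fun p q : List Char × Nat => p.2 ≤ q.2) pvKeywordRanks := by
  decide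

lemma pvRanks_le5 : ∀ p ∈ pvKeywordRanks, p.2 ≤ 5 := by decide

lemma pvInner_eq (s : List Char) (b : Nat) (hb : b ≤ 5) :
    pvInner s b = min b (pvHere s) := by
  unfold pvInner pvHere
  rw [show pvKeywordRanks.foldl
      (fun m p => if PySem.Chars.startswith s p.1 then min m p.2 else m) b =
    (pvKeywordRanks.map fun p => (PySem.Chars.startswith s p.1, p.2)).foldl
      (fun m p => if p.1 then min m p.2 else m) b by rw [List.foldl_map]]
  apply pvFoldl_min _ (List.pairwise_map.mpr (by simpa using pvRanks_sorted))
    (by intro q hq; obtain ⟨q', hq', rfl⟩ := List.mem_map.mp hq; exact pvRanks_le5 q' hq') _ hb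

lemma pvHere_le5 (s : List Char) : pvHere s ≤ 5 := by
  apply pvChain_le5
  intro q hq; obtain ⟨q', hq', rfl⟩ := List.mem_map.mp hq; exact pvRanks_le5 q' hq'

lemma pvSweep_le5 (name : List Char) : pvSweep name ≤ 5 := by
  cases name with
  | nil => simp [pvSweep]
  | cons c cs => exact le_trans (Nat.min_le_left _ _) (pvHere_le5 _)

-- B's index sweep computes min best (pvSweep name)
lemma pvRangeFold (name : List Char) (best : Nat) (hb : best ≤ 5) :
    (List.range name.length).foldl (fun b i => pvInner (name.drop i) b) best =
      min best (pvSweep name) := by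
  induction name generalizing best with
  | nil => simp [pvSweep, Nat.min_eq_left hb]
  | cons c cs ih =>
    rw [show (c :: cs).length = cs.length + 1 from rfl, List.range_succ_eq_map,
      List.foldl_cons, List.foldl_map]
    have hstep : ∀ (b : Nat),
        (List.range cs.length).foldl (fun b i => pvInner ((c :: cs).drop i.succ) b) b =
        (List.range cs.length).foldl (fun b i => pvInner (cs.drop i) b) b := by
      intro b
      apply PySem.List.foldl_congr_mem
      intro b' i _; rfl
    rw [List.drop_zero, hstep, pvInner_eq _ _ hb,
      ih _ (le_trans (Nat.min_le_left _ _) hb)]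
    have h1 : pvSweep (c :: cs) = min (pvHere (c :: cs)) (pvSweep cs) := rfl
    omega

-- B's sweep value equals A's rank chain
lemma pvSweep_eq_rankOf (name : List Char) : pvSweep name = pvRankOf name := by
  induction name with
  | nil => decide
  | cons c cs ih =>
    have hor := pvChain_or
      (pvKeywordRanks.map fun p => (PySem.Chars.startswith (c :: cs) p.1, PySem.Chars.isIn p.1 cs, p.2))
      (List.pairwise_map.mpr (by simpa using pvRanks_sorted))
      (by intro q hq; obtain ⟨q', hq', rfl⟩ := List.mem_map.mp hq; exact pvRanks_le5 q' hq')
    simp only [List.map_map, Function.comp_def] at hor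
    unfold pvSweep pvRankOf
    rw [ih]
    unfold pvRankOf pvHere
    have hmapor :
        (pvKeywordRanks.map fun p => (PySem.Chars.isIn p.1 (c :: cs), p.2)) =
        (pvKeywordRanks.map fun p =>
          (PySem.Chars.startswith (c :: cs) p.1 || PySem.Chars.isIn p.1 cs, p.2)) := by
      apply List.map_congr_left
      intro p _
      rw [pvIsIn_cons]
    rw [hmapor, hor]

lemma pvBestRank_eq_rankOf (name : List Char) : pvBestRank name = pvRankOf name := by
  unfold pvBestRank
  rw [PySem.List.pyRange_one, List.foldl_map,
    show ((name.length : Int) - 0).toNat = name.length by omega]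
  have h : List.foldl
      (fun (x : Nat) (y : Nat) => pvKeywordRanks.foldl
        (fun b p => if PySem.Chars.startswith (name.drop ((0 + (y : Int)).toNat)) p.1 then min b p.2 else b) x)
      5 (List.range name.length) =
      List.foldl (fun b i => pvInner (name.drop i) b) 5 (List.range name.length) :=
    PySem.List.foldl_congr_mem _ _ _ _ (by
      intro b' i _
      show _ = pvInner (name.drop i) b'
      rw [show ((0 + (i : Int)).toNat) = i by omega]
      rfl)
  rw [h]
  rw [pvRangeFold name 5 (le_refl 5), Nat.min_eq_right (le_trans (pvSweep_le5 name) (by omega)),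
    pvSweep_eq_rankOf]

-- ===== VERDICT (by name: the statement is the Claim_ definition above) =====
theorem get_parameter_category_py_spec : Claim_equal_get_parameter_category_py := by
  intro s _
  unfold Spec_get_parameter_category_py get_parameter_category_py get_parameter_category_py_alt
  rw [pvBestRank_eq_rankOf]
  simp only [PySem.Str.isIn_eq, PySem.Str.toList_lower]
  unfold pvRankOf pvKeywordRanks pvCategories
  simp only [List.map_cons, List.map_nil, pvChain, List.any_cons, List.any_nil, Bool.or_false]
  split_ifs <;> simp_all
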